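-- pv_equiv track=rewrite | github.com/sun10081/leetcode_practice_xiaorui | questions/week/2021/2021_12_19/4_k_Increasing.py | kIncreasing2
-- ===== SOURCE A (Python) =====
-- from bisect import bisect_right
-- from typing import List
--
-- def kIncreasing2(arr: List[int], k: int) -> int:
--     ans = 0
--     for i in range(k):
--         sub = arr[i::k]
--         lis = []
--         for x in sub:
--             if not lis or lis[-1] <= x:
--                 lis.append(x)
--             else:
--                 loc = bisect_right(lis, x)
--                 lis[loc] = x
--         ans += len(sub) - len(lis)
--     return ans
-- ===== SOURCE B (Python) =====
-- def kIncreasing2(arr, k):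
--     ans = 0
--     for i in range(k):
--         sub = arr[i::k]
--         dp = []
--         for x in sub:
--             best = 1
--             for v, d in zip(sub, dp):
--                 if v <= x and d + 1 > best:
--                     best = d + 1
--             dp.append(best)
--         ans += len(sub) - (max(dp) if dp else 0)
--     return ans
-- ===== Notes on version B (the rewrite author's own statement) =====
-- stated objective: alternative
-- what changed: Replaces the patience-sorting tails list with bisect_right replacement by a classic quadratic DP per stride: dp[j] = 1 + best dp over earlier stride elements <= current, answer adds len(sub) - max(dp).
import Mathlib
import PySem

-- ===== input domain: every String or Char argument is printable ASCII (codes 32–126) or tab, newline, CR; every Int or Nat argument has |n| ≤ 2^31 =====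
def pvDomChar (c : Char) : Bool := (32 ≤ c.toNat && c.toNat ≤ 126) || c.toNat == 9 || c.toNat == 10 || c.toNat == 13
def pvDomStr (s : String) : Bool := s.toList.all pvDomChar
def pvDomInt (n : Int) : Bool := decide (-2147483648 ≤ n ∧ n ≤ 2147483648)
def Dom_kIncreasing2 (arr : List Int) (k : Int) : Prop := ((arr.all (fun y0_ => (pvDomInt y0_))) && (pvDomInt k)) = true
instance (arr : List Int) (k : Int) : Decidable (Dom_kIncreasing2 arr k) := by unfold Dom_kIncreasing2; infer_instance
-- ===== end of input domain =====

-- B replaces A's patience-sorting tails structure by the classic quadratic DP per stride (same value, no speed claim).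

-- ===== PORT A =====
-- bisect_right on a sorted list returns the number of elements ≤ x; A's `lis` is sorted at every call.
def pvBisectRight (lis : List Int) (x : Int) : Nat :=
  lis.countP (fun v => decide (v ≤ x))

-- one iteration of A's inner loop: `if not lis or lis[-1] <= x: append else: lis[loc] = x`
def pvStepA (lis : List Int) (x : Int) : List Int :=
  match lis.getLast? with
  | none => lis ++ [x]
  | some last => if last ≤ x then lis ++ [x] else lis.set (pvBisectRight lis x) x

def kIncreasing2 (arr : List Int) (k : Int) : Int :=
  (PySem.List.pyRange 0 k 1).foldl (fun ans i =>
    -- arr[i::k]; inside the loop 1 ≤ k so slice? is always `some`, the [] default is unreachable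
    let sub := (PySem.List.slice? arr (some i) none k).getD []
    let lis := sub.foldl pvStepA []
    ans + ((sub.length : Int) - (lis.length : Int))) 0

-- ===== PORT B =====
-- B's inner loop `for v, d in zip(sub, dp): if v <= x and d + 1 > best: best = d + 1` with best = 1
def pvBest (prs : List (Int × Int)) (x : Int) : Int :=
  prs.foldl (fun b vd => if vd.1 ≤ x ∧ vd.2 + 1 > b then vd.2 + 1 else b) 1

def kIncreasing2_alt (arr : List Int) (k : Int) : Int :=
  (PySem.List.pyRange 0 k 1).foldl (fun ans i =>
    let sub := (PySem.List.slice? arr (some i) none k).getD []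
    let dp := sub.foldl (fun dp x => dp ++ [pvBest (sub.zip dp) x]) []
    let L : Int := match PySem.List.max? dp (fun y => y) with | some m => m | none => 0
    ans + ((sub.length : Int) - L)) 0

-- ===== PRECONDITION & SPEC =====
def Spec_kIncreasing2 (arr : List Int) (k : Int) (out : Int) : Prop := out = kIncreasing2_alt arr k
instance (arr : List Int) (k : Int) (out : Int) : Decidable (Spec_kIncreasing2 arr k out) := by unfold Spec_kIncreasing2; infer_instance

-- ===== CLAIM (what is proved, stated in full; the proofs are below) =====
def Claim_equal_kIncreasing2 : Prop := ∀ (arr : List Int) (k : Int), Dom_kIncreasing2 arr k → Spec_kIncreasing2 arr k (kIncreasing2 arr k)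

-- ===== LEMMAS AND PROOFS =====

-- A's tails list after processing p, and B's dp values (as (value, dp) pairs) after processing p
def pvTails (p : List Int) : List Int := p.foldl pvStepA []
def pvPairs (p : List Int) : List (Int × Int) :=
  p.foldl (fun prs x => prs ++ [(x, pvBest prs x)]) []

-- the invariant linking the two states: tails sorted, dp values in [1, |t|],
-- every tails slot j is the value of some element of dp value j+1, and is minimal
-- among values whose dp value is ≥ j+1
def pvInv (prs : List (Int × Int)) (t : List Int) : Prop :=
  t.Pairwise (· ≤ ·) ∧
  (∀ vd ∈ prs, 1 ≤ vd.2 ∧ vd.2 ≤ (t.length : Int)) ∧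
  (∀ j : Nat, j < t.length → ∃ vd ∈ prs, vd.2 = (j : Int) + 1 ∧ vd.1 = t.getD j 0) ∧
  (∀ vd ∈ prs, ∀ j : Nat, j < t.length → (j : Int) + 1 ≤ vd.2 → t.getD j 0 ≤ vd.1)

theorem pvPairs_snoc (p : List Int) (x : Int) :
    pvPairs (p ++ [x]) = pvPairs p ++ [(x, pvBest (pvPairs p) x)] := by
  simp [pvPairs, List.foldl_append]

theorem pvTails_snoc (p : List Int) (x : Int) :
    pvTails (p ++ [x]) = pvStepA (pvTails p) x := by
  simp [pvTails, List.foldl_append]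

theorem pvPairs_fst (p : List Int) : (pvPairs p).map Prod.fst = p := by
  induction p using List.reverseRecOn with
  | nil => rfl
  | append_singleton p x ih => simp [pvPairs_snoc, ih]

theorem pvPairs_length (p : List Int) : (pvPairs p).length = p.length := by
  have := congrArg List.length (pvPairs_fst p); simpa using this

theorem pv_zip_trunc {α β : Type} : ∀ (p : List α) (dp : List β) (r : List α),
    dp.length ≤ p.length → (p ++ r).zip dp = p.zip dp := by
  intro p
  induction p with
  | nil =>
    intro dp r h
    have : dp = [] := List.length_eq_zero_iff.mp (Nat.le_zero.mp h)
    simp [this]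
  | cons a p ih =>
    intro dp r h
    cases dp with
    | nil => simp
    | cons b dp => simp [List.zip_cons_cons, ih dp r (by simpa using h)]

theorem pv_zip_fst_snd {α β : Type} : ∀ (l : List (α × β)),
    (l.map Prod.fst).zip (l.map Prod.snd) = l := by
  intro l; induction l with
  | nil => rfl
  | cons a l ih => simp [ih]

theorem pvB_fold_gen (sub : List Int) : ∀ (q p : List Int), sub = p ++ q →
    q.foldl (fun dp x => dp ++ [pvBest (sub.zip dp) x]) ((pvPairs p).map Prod.snd) =
      (pvPairs (p ++ q)).map Prod.snd := by
  intro q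
  induction q with
  | nil => intro p h; simp
  | cons x q ih =>
    intro p h
    have hlen : ((pvPairs p).map Prod.snd).length ≤ p.length := by
      simp [pvPairs_length]
    have hz : sub.zip ((pvPairs p).map Prod.snd) = pvPairs p := by
      rw [h, pv_zip_trunc p _ (x :: q) hlen]
      have h2 := pv_zip_fst_snd (pvPairs p)
      rw [pvPairs_fst] at h2
      exact h2
    simp only [List.foldl_cons, hz]
    have hsn : (pvPairs p).map Prod.snd ++ [pvBest (pvPairs p) x] =
        (pvPairs (p ++ [x])).map Prod.snd := by
      rw [pvPairs_snoc]; simp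
    rw [hsn]
    have := ih (p ++ [x]) (by simp [h])
    simpa using this

-- B's fold over sub equals the dp values of pvPairs
theorem pvB_fold (sub : List Int) :
    sub.foldl (fun dp x => dp ++ [pvBest (sub.zip dp) x]) [] = (pvPairs sub).map Prod.snd := by
  have := pvB_fold_gen sub sub [] (by simp)
  simpa [pvPairs] using this

-- countP characterization on sorted lists
theorem pv_countP_sorted (x : Int) : ∀ (t : List Int), t.Pairwise (· ≤ ·) →
    ∀ j : Nat, j < t.length →
      (t.getD j 0 ≤ x ↔ j < t.countP (fun v => decide (v ≤ x))) := by
  intro t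
  induction t with
  | nil => simp
  | cons a t ih =>
    intro hs j hj
    rw [List.pairwise_cons] at hs
    obtain ⟨ha, hs'⟩ := hs
    rw [List.countP_cons]
    by_cases hax : a ≤ x
    · simp only [hax, decide_true, if_true]
      cases j with
      | zero => simpa using hax
      | succ j =>
        have hihj := ih hs' j (by simpa using hj)
        rw [List.getD_cons_succ, hihj]
        omega
    · have hzero : t.countP (fun v => decide (v ≤ x)) = 0 := by
        rw [List.countP_eq_zero]
        intro v hv
        have := ha v hv
        simp only [decide_eq_true_eq]
        omega
      have hax' : (decide (a ≤ x)) = false := by simpa using hax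
      rw [hzero, hax']
      simp only [Nat.not_lt_zero, iff_false, Bool.false_eq_true, if_false, Nat.add_zero]
      cases j with
      | zero => simpa using hax
      | succ j =>
        have hj' : j < t.length := by simpa using hj
        have hmem : t.getD j 0 ∈ t := by
          rw [List.getD_eq_getElem t 0 hj']
          exact List.getElem_mem hj'
        have := ha _ hmem
        simp only [List.getD_cons_succ]
        omega

-- pvBest computes 1 + (max dp value among pairs with value ≤ x), sandwiched to countP+1
theorem pvBest_spec (x : Int) : ∀ (prs : List (Int × Int)) (b : Int),
    b ≤ prs.foldl (fun b vd => if vd.1 ≤ x ∧ vd.2 + 1 > b then vd.2 + 1 else b) b ∧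
    (∀ vd ∈ prs, vd.1 ≤ x → vd.2 + 1 ≤ prs.foldl (fun b vd => if vd.1 ≤ x ∧ vd.2 + 1 > b then vd.2 + 1 else b) b) ∧
    (prs.foldl (fun b vd => if vd.1 ≤ x ∧ vd.2 + 1 > b then vd.2 + 1 else b) b = b ∨
      ∃ vd ∈ prs, vd.1 ≤ x ∧ prs.foldl (fun b vd => if vd.1 ≤ x ∧ vd.2 + 1 > b then vd.2 + 1 else b) b = vd.2 + 1) := by
  intro prs
  induction prs with
  | nil => intro b; exact ⟨le_refl _, by simp, Or.inl rfl⟩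
  | cons vd prs ih =>
    intro b
    simp only [List.foldl_cons]
    set b' := if vd.1 ≤ x ∧ vd.2 + 1 > b then vd.2 + 1 else b with hb'def
    have hb' : b ≤ b' := by
      rw [hb'def]; split_ifs with h
      · omega
      · exact le_refl _
    obtain ⟨h1, h2, h3⟩ := ih b'
    refine ⟨le_trans hb' h1, ?_, ?_⟩
    · intro wd hw hwx
      rcases List.mem_cons.mp hw with rfl | hw'
      · by_cases hc : wd.1 ≤ x ∧ wd.2 + 1 > b
        · have hbe : b' = wd.2 + 1 := by rw [hb'def, if_pos hc]
          exact le_trans (le_of_eq hbe.symm) h1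
        · have hle : wd.2 + 1 ≤ b := by
            rcases not_and_or.mp hc with h | h
            · exact absurd hwx h
            · omega
          exact le_trans (le_trans hle hb') h1
      · exact h2 wd hw' hwx
    · rcases h3 with heq | ⟨wd, hw, hwx, hre⟩
      · by_cases hc : vd.1 ≤ x ∧ vd.2 + 1 > b
        · have hbe : b' = vd.2 + 1 := by rw [hb'def, if_pos hc]
          right; exact ⟨vd, List.mem_cons_self, hc.1, heq.trans hbe⟩
        · have hbe : b' = b := by rw [hb'def, if_neg hc]
          left; exact heq.trans hbe
      · right; exact ⟨wd, List.mem_cons_of_mem _ hw, hwx, hre⟩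

theorem pvBest_eq (prs : List (Int × Int)) (t : List Int) (x : Int) (h : pvInv prs t) :
    pvBest prs x = (t.countP (fun v => decide (v ≤ x)) : Int) + 1 := by
  obtain ⟨hs, hL, hE, hM⟩ := h
  obtain ⟨h1, h2, h3⟩ := pvBest_spec x prs 1
  have hcle : t.countP (fun v => decide (v ≤ x)) ≤ t.length := List.countP_le_length
  unfold pvBest
  have hub : prs.foldl (fun b vd => if vd.1 ≤ x ∧ vd.2 + 1 > b then vd.2 + 1 else b) 1 ≤
      (t.countP (fun v => decide (v ≤ x)) : Int) + 1 := by
    rcases h3 with heq | ⟨vd, hv, hvx, hre⟩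
    · rw [heq]; omega
    · rw [hre]
      by_contra hlt
      push Not at hlt
      obtain ⟨hd1, hd2⟩ := hL vd hv
      have hclen : t.countP (fun v => decide (v ≤ x)) < t.length := by omega
      have hMc := hM vd hv _ hclen (by omega)
      have := (pv_countP_sorted x t hs _ hclen).mp (le_trans hMc hvx)
      omega
  have hlb : (t.countP (fun v => decide (v ≤ x)) : Int) + 1 ≤
      prs.foldl (fun b vd => if vd.1 ≤ x ∧ vd.2 + 1 > b then vd.2 + 1 else b) 1 := by
    rcases Nat.eq_zero_or_pos (t.countP (fun v => decide (v ≤ x))) with h0 | hpos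
    · rw [h0]; simpa using h1
    · have hj : t.countP (fun v => decide (v ≤ x)) - 1 < t.length := by omega
      have hx : t.getD (t.countP (fun v => decide (v ≤ x)) - 1) 0 ≤ x :=
        (pv_countP_sorted x t hs _ hj).mpr (by omega)
      obtain ⟨vd, hv, hd, hval⟩ := hE _ hj
      have hr := h2 vd hv (by rw [hval]; exact hx)
      rw [hd] at hr
      omega
  omega

theorem pvInv_step (prs : List (Int × Int)) (t : List Int) (x : Int) (h : pvInv prs t) :
    pvInv (prs ++ [(x, pvBest prs x)]) (pvStepA t x) := by
  have hbest := pvBest_eq prs t x h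
  obtain ⟨hs, hL, hE, hM⟩ := h
  rcases hgl : t.getLast? with _ | last
  · -- t = []: append x, new dp value 1
    have ht : t = [] := List.getLast?_eq_none_iff.mp hgl
    subst ht
    have hprs : prs = [] := by
      cases prs with
      | nil => rfl
      | cons a l =>
        have := hL a List.mem_cons_self
        simp at this
        omega
    subst hprs
    simp only [pvStepA, List.getLast?_nil, List.nil_append]
    have hb1 : pvBest [] x = 1 := rfl
    refine ⟨by simp, ?_, ?_, ?_⟩
    · intro vd hv
      simp at hv
      subst hv
      simp [hb1]
    · intro j hj
      simp at hj
      subst hj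
      exact ⟨(x, 1), by simp [hb1], by simp, by simp⟩
    · intro vd hv j hj hjd
      simp at hv hj
      subst hv hj
      simp
  · have hne : t ≠ [] := by intro hnil; rw [hnil] at hgl; simp at hgl
    have hlen : 0 < t.length := List.length_pos_iff.mpr hne
    have hlast : last = t.getD (t.length - 1) 0 := by
      rw [List.getLast?_eq_some_getLast hne] at hgl
      rw [List.getD_eq_getElem _ _ (by omega), ← List.getLast_eq_getElem]
      exact (Option.some_injective _ hgl).symm
    have hcle : t.countP (fun v => decide (v ≤ x)) ≤ t.length := List.countP_le_length
    by_cases hlx : last ≤ x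
    · -- last ≤ x: all of t is ≤ x, countP = length, append
      have hclen : t.countP (fun v => decide (v ≤ x)) = t.length := by
        have := (pv_countP_sorted x t hs (t.length - 1) (by omega)).mp (hlast ▸ hlx)
        omega
      have hall : ∀ v ∈ t, v ≤ x := by
        intro v hv
        have := List.countP_eq_length.mp hclen v hv
        simpa using this
      have hbest' : pvBest prs x = (t.length : Int) + 1 := by rw [hbest, hclen]
      simp only [pvStepA, hgl, if_pos hlx]
      refine ⟨?_, ?_, ?_, ?_⟩
      · rw [List.pairwise_append]
        refine ⟨hs, by simp, ?_⟩
        intro a ha b hb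
        simp at hb
        subst hb
        exact hall a ha
      · intro vd hv
        rcases List.mem_append.mp hv with hv | hv
        · have := hL vd hv
          simp only [List.length_append, List.length_cons, List.length_nil]
          push_cast
          omega
        · simp at hv
          subst hv
          simp only [List.length_append, List.length_cons, List.length_nil, hbest']
          push_cast
          omega
      · intro j hj
        simp only [List.length_append, List.length_cons, List.length_nil] at hj
        by_cases hjl : j < t.length
        · obtain ⟨vd, hv, hd, hval⟩ := hE j hjl
          exact ⟨vd, List.mem_append_left _ hv, hd, by rw [List.getD_append _ _ _ _ hjl]; exact hval⟩
        · have hj' : j = t.length := by omega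
          subst hj'
          refine ⟨(x, pvBest prs x), List.mem_append_right _ (by simp), by rw [hbest'], ?_⟩
          rw [List.getD_eq_getElem _ _ (by simp), List.getElem_concat_length]; rfl
      · intro vd hv j hj hjd
        simp only [List.length_append, List.length_cons, List.length_nil] at hj
        rcases List.mem_append.mp hv with hv | hv
        · have hd2 := (hL vd hv).2
          have hjl : j < t.length := by omega
          rw [List.getD_append _ _ _ _ hjl]
          exact hM vd hv j hjl hjd
        · simp at hv
          subst hv
          by_cases hjl : j < t.length
          · rw [List.getD_append _ _ _ _ hjl]
            refine hall _ ?_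
            rw [List.getD_eq_getElem _ _ hjl]
            exact List.getElem_mem hjl
          · have hj' : j = t.length := by omega
            subst hj'
            rw [List.getD_eq_getElem _ _ (by simp), List.getElem_concat_length]; rfl
    · -- last > x: replace slot c = countP (· ≤ x) t
      have hclt : t.countP (fun v => decide (v ≤ x)) < t.length := by
        rcases Nat.lt_or_ge (t.countP (fun v => decide (v ≤ x))) t.length with h | h
        · exact h
        · exfalso
          have hceq : t.countP (fun v => decide (v ≤ x)) = t.length := by omega
          have := (pv_countP_sorted x t hs (t.length - 1) (by omega)).mpr (by omega)
          rw [← hlast] at this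
          exact hlx this
      have hmono : ∀ i j : Nat, i ≤ j → j < t.length → t.getD i 0 ≤ t.getD j 0 := by
        intro i j hij hj
        rcases Nat.eq_or_lt_of_le hij with rfl | hlt
        · exact le_refl _
        · rw [List.getD_eq_getElem _ _ (by omega), List.getD_eq_getElem _ _ hj]
          exact List.pairwise_iff_getElem.mp hs i j (by omega) hj hlt
      have hgtc : ¬ t.getD (t.countP (fun v => decide (v ≤ x))) 0 ≤ x := by
        intro hle
        have := (pv_countP_sorted x t hs _ hclt).mp hle
        omega
      have hltc : ∀ j, j < t.countP (fun v => decide (v ≤ x)) → t.getD j 0 ≤ x := by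
        intro j hj
        exact (pv_countP_sorted x t hs j (by omega)).mpr hj
      simp only [pvStepA, hgl, if_neg hlx, pvBisectRight]
      have hlen' : (t.set (t.countP (fun v => decide (v ≤ x))) x).length = t.length :=
        List.length_set ..
      have hget : ∀ j, j < t.length →
          (t.set (t.countP (fun v => decide (v ≤ x))) x).getD j 0 =
            if t.countP (fun v => decide (v ≤ x)) = j then x else t.getD j 0 := by
        intro j hj
        rw [List.getD_eq_getElem _ _ (by omega), List.getElem_set]
        by_cases hcj : t.countP (fun v => decide (v ≤ x)) = j
        · simp [hcj]
        · rw [if_neg hcj, if_neg hcj, List.getD_eq_getElem _ _ hj]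
      refine ⟨?_, ?_, ?_, ?_⟩
      · rw [List.pairwise_iff_getElem]
        intro i j hi hj hij
        rw [List.getElem_set, List.getElem_set]
        have hi' : i < t.length := by omega
        have hj' : j < t.length := by omega
        by_cases hci : t.countP (fun v => decide (v ≤ x)) = i <;>
          by_cases hcj : t.countP (fun v => decide (v ≤ x)) = j
        · omega
        · rw [if_pos hci, if_neg hcj]
          have h1 := hmono i j (by omega) hj'
          rw [List.getD_eq_getElem _ _ hi', List.getD_eq_getElem _ _ hj'] at h1
          have h2 := hgtc
          rw [hci, List.getD_eq_getElem _ _ hi'] at h2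
          omega
        · rw [if_neg hci, if_pos hcj]
          have h1 := hltc i (by omega)
          rw [List.getD_eq_getElem _ _ hi'] at h1
          exact h1
        · rw [if_neg hci, if_neg hcj]
          exact List.pairwise_iff_getElem.mp hs i j hi' hj' hij
      · intro vd hv
        rw [hlen']
        rcases List.mem_append.mp hv with hv | hv
        · exact hL vd hv
        · simp at hv
          subst hv
          simp only [hbest]
          omega
      · intro j hj
        rw [hlen'] at hj
        by_cases hcj : t.countP (fun v => decide (v ≤ x)) = j
        · refine ⟨(x, pvBest prs x), List.mem_append_right _ (by simp), ?_, ?_⟩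
          · rw [hbest, hcj]
          · rw [hget j hj, if_pos hcj]
        · obtain ⟨vd, hv, hd, hval⟩ := hE j hj
          exact ⟨vd, List.mem_append_left _ hv, hd, by rw [hget j hj, if_neg hcj]; exact hval⟩
      · intro vd hv j hj hjd
        rw [hlen'] at hj
        rcases List.mem_append.mp hv with hv | hv
        · by_cases hcj : t.countP (fun v => decide (v ≤ x)) = j
          · rw [hget j hj, if_pos hcj]
            obtain ⟨hd1, hd2⟩ := hL vd hv
            obtain ⟨jd, hjdeq⟩ : ∃ jd : Nat, (jd : Int) = vd.2 - 1 := ⟨(vd.2 - 1).toNat, by omega⟩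
            have hjdl : jd < t.length := by omega
            have h1 := hM vd hv jd hjdl (by omega)
            have h2 := hmono (t.countP (fun v => decide (v ≤ x))) jd (by omega) hjdl
            have h3 := hgtc
            omega
          · rw [hget j hj, if_neg hcj]
            exact hM vd hv j hj hjd
        · simp at hv
          subst hv
          simp only [hbest] at hjd
          by_cases hcj : t.countP (fun v => decide (v ≤ x)) = j
          · rw [hget j hj, if_pos hcj]
          · rw [hget j hj, if_neg hcj]
            exact hltc j (by omega)

theorem pvInv_holds (p : List Int) : pvInv (pvPairs p) (pvTails p) := by
  induction p using List.reverseRecOn with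
  | nil =>
    refine ⟨by simp [pvTails], ?_, ?_, ?_⟩ <;> simp [pvPairs, pvTails]
  | append_singleton p x ih =>
    rw [pvPairs_snoc, pvTails_snoc]
    exact pvInv_step _ _ x ih

-- per-stride equality: length of A's tails = B's max(dp) (0 if empty)
theorem pv_stride (sub : List Int) :
    ((sub.foldl pvStepA []).length : Int) =
      (match PySem.List.max? (sub.foldl (fun dp x => dp ++ [pvBest (sub.zip dp) x]) []) (fun y => y) with
        | some m => m | none => 0) := by
  obtain ⟨hs, hL, hE, hM⟩ := pvInv_holds sub
  rw [pvB_fold]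
  show ((pvTails sub).length : Int) = _
  by_cases h0 : (pvTails sub).length = 0
  · have hprs : pvPairs sub = [] := by
      cases hp : pvPairs sub with
      | nil => rfl
      | cons a l =>
        exfalso
        have := hL a (by rw [hp]; exact List.mem_cons_self)
        omega
    rw [hprs]
    have hnone : PySem.List.max? (([] : List (Int × Int)).map Prod.snd) (fun y => y) = none := by
      rw [PySem.List.max?_eq_none_iff]
      rfl
    rw [hnone, h0]
    rfl
  · have hlen : 0 < (pvTails sub).length := Nat.pos_of_ne_zero h0
    obtain ⟨vd0, hv0, hd0, _⟩ := hE ((pvTails sub).length - 1) (by omega)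
    have hmem0 : vd0.2 ∈ (pvPairs sub).map Prod.snd := List.mem_map_of_mem hv0
    rcases hmax : PySem.List.max? ((pvPairs sub).map Prod.snd) (fun y => y) with _ | m
    · exfalso
      rw [PySem.List.max?_eq_none_iff] at hmax
      rw [hmax] at hmem0
      simp at hmem0
    · show ((pvTails sub).length : Int) = m
      have hmm := PySem.List.max?_mem hmax
      have hub := PySem.List.max?_isMax hmax
      obtain ⟨vd, hv, hvd⟩ := List.mem_map.mp hmm
      have h1 := (hL vd hv).2
      have h2 := hub vd0.2 hmem0
      simp only at h2
      omega

theorem pv_main (arr : List Int) (k : Int) : kIncreasing2 arr k = kIncreasing2_alt arr k := by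
  unfold kIncreasing2 kIncreasing2_alt
  congr 1
  funext ans i
  have := pv_stride ((PySem.List.slice? arr (some i) none k).getD [])
  simp only [] at this ⊢
  omega

-- ===== VERDICT (by name: the statement is the Claim_ definition above) =====
theorem kIncreasing2_spec : Claim_equal_kIncreasing2 := by
  intro arr k _
  unfold Spec_kIncreasing2
  exact pv_main arr k
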